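-- pv_equiv track=rewrite | github.com/Gravitar64/A-beautiful-code-in-Python | Teil_xx_Bitboards.py | gen_pieces_bb
-- ===== SOURCE A (Python) =====
-- def gen_pieces_bb(position):
--   bb, all_pieces = {}, [0,0]
--   w = b = 0
--   for i, fig in position.items():
--     board = 0 if fig not in bb else bb[fig]
--     board |= 1 << i
--     bb[fig] = board
--     all_pieces[fig.isupper()] |= board
--   return bb, all_pieces, all_pieces[0] | all_pieces[1]
-- ===== SOURCE B (Python) =====
-- def gen_pieces_bb(position):
--   order = []
--   for fig in position.values():
--     if fig not in order:
--       order.append(fig)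
--   bb = {fig: sum(1 << i for i, g in position.items() if g == fig) for fig in order}
--   all_pieces = [sum(bd for f, bd in bb.items() if not f.isupper()),
--                 sum(bd for f, bd in bb.items() if f.isupper())]
--   return bb, all_pieces, all_pieces[0] + all_pieces[1]
-- ===== Notes on version B (the rewrite author's own statement) =====
-- stated objective: alternative
-- what changed: B replaces A's incremental bitwise-OR accumulation with a group-and-sum scheme: it collects the distinct pieces in first-occurrence order, builds each piece's bitboard as an arithmetic sum of the powers of two of that piece's squares (valid because the squares are distinct, so the powers are disjoint), derives the two colour boards as case-filtered sums over the finished dict, and returns their arithmetic sum as the occupancy board.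
import Mathlib
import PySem

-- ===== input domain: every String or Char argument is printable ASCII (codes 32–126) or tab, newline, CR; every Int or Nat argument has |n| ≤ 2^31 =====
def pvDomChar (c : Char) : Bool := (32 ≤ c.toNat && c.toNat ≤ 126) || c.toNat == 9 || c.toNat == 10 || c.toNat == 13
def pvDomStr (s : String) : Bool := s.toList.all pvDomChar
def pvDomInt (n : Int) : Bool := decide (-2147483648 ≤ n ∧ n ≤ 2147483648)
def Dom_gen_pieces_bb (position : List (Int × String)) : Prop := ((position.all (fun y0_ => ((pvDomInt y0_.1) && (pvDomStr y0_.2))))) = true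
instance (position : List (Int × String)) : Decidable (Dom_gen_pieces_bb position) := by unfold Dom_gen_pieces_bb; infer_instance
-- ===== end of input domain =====

-- B builds each piece's bitboard by grouping and arithmetic summation of the distinct
-- powers 1<<i (and adds the two colour sums), instead of A's per-square OR accumulation
-- into a growing dict (objective: alternative).

-- shared helper of both ports --

-- `s.isupper()`; exact on the ASCII domain, where the cased characters are exactly the alphabetic ones
def pyIsupperStr (s : String) : Bool :=
  s.toList.any PySem.Str.isalpha && s.toList.all (fun c => !(PySem.Str.islower c))

-- `1 << i` for a square number i (Pre_ gives 0 ≤ i)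
def pvShift (i : Int) : Int := (1 : Int) <<< i.toNat

-- ===== PORT A =====
-- `all_pieces[u] |= bd` on the two-element list all_pieces (u = fig.isupper(): False = index 0, True = index 1)
def pvOrAt (all : List Int) (u : Bool) (bd : Int) : List Int :=
  match all with
  | [a0, a1] => if u then [a0, PySem.Int.bor a1 bd] else [PySem.Int.bor a0 bd, a1]
  | l => l

-- loop body of A ('w = b = 0' in the source is dead and not ported)
def pvStepA (st : PySem.Dict String Int × List Int) (ifig : Int × String) :
    PySem.Dict String Int × List Int :=
  let bb := st.1
  let all_pieces := st.2
  let i := ifig.1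
  let fig := ifig.2
  let board : Int := if bb.contains fig = false then 0 else bb.getD fig 0
  let board := PySem.Int.bor board (pvShift i)   -- board |= 1 << i
  let bb := bb.insert fig board
  let all_pieces := pvOrAt all_pieces (pyIsupperStr fig) board
  (bb, all_pieces)

def gen_pieces_bb (position : List (Int × String)) : (List (String × Int)) × List Int × Int :=
  let st := position.foldl pvStepA (PySem.Dict.empty, [0, 0])
  (st.1.items, st.2,
   PySem.Int.bor (PySem.List.pyGetD st.2 0 0) (PySem.List.pyGetD st.2 1 0))

-- ===== PORT B =====
def gen_pieces_bb_alt (position : List (Int × String)) : (List (String × Int)) × List Int × Int :=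
  -- order: the distinct figures in first-occurrence order
  let order := position.foldl (fun acc p => if acc.contains p.2 then acc else acc ++ [p.2]) ([] : List String)
  -- bb = {fig: sum(1 << i for i, g in position.items() if g == fig) for fig in order}
  let bb := order.map (fun f =>
    (f, ((position.filter (fun p => p.2 == f)).map (fun p => pvShift p.1)).sum))
  -- all_pieces = [sum of lowercase-side boards, sum of uppercase-side boards]
  let all_pieces : List Int :=
    [((bb.filter (fun q => !(pyIsupperStr q.1))).map Prod.snd).sum,
     ((bb.filter (fun q => pyIsupperStr q.1)).map Prod.snd).sum]
  (bb, all_pieces, PySem.List.pyGetD all_pieces 0 0 + PySem.List.pyGetD all_pieces 1 0)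

-- ===== PRECONDITION & SPEC =====
-- Pre_ excludes (a) negative square numbers, on which Python's '1 << i' raises ValueError,
-- and (b) association lists with duplicate keys, which do not represent a dict (the input is a dict in Python).
def Pre_gen_pieces_bb (position : List (Int × String)) : Prop :=
  (∀ p ∈ position, 0 ≤ p.1) ∧ (position.map Prod.fst).Nodup
instance (position : List (Int × String)) : Decidable (Pre_gen_pieces_bb position) := by
  unfold Pre_gen_pieces_bb; infer_instance

def pvWitness_gen_pieces_bb : (List (Int × String)) := [(0, "P"), (5, "p"), (62, "K")]

def Spec_gen_pieces_bb (position : List (Int × String)) (out : (List (String × Int)) × List Int × Int) : Prop := out = gen_pieces_bb_alt position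
instance (position : List (Int × String)) (out : (List (String × Int)) × List Int × Int) : Decidable (Spec_gen_pieces_bb position out) := by unfold Spec_gen_pieces_bb; infer_instance

-- ===== CLAIM (what is proved, stated in full; the proofs are below) =====
def Claim_equal_gen_pieces_bb : Prop := ∀ (position : List (Int × String)), Dom_gen_pieces_bb position → Pre_gen_pieces_bb position → Spec_gen_pieces_bb position (gen_pieces_bb position)

-- ===== LEMMAS AND PROOFS =====

-- A's dict updates, isolated (proof-only; used to factor A's loop into dict building + colour pass)
def pvStepB (bb : PySem.Dict String Int) (ifig : Int × String) : PySem.Dict String Int :=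
  bb.insert ifig.2 (PySem.Int.bor (bb.getD ifig.2 0) (pvShift ifig.1))

-- A's colour accumulation, as a function of the item list it runs over
def spL (l : List (String × Int)) (a : List Int) : List Int :=
  l.foldl (fun all fb => pvOrAt all (pyIsupperStr fb.1) fb.2) a

-- the list of shifts 1<<i of the squares carrying figure f, in position order
def shL (pos : List (Int × String)) (f : String) : List Int :=
  (pos.filter (fun p => p.2 == f)).map (fun p => pvShift p.1)

-- the squares (as Nats) carrying figure f
def nsOf (pos : List (Int × String)) (f : String) : List Nat :=
  (pos.filter (fun p => p.2 == f)).map (fun p => p.1.toNat)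

-- left fold of Python's `|` over a list
def orF (a : Int) (l : List Int) : Int := l.foldl PySem.Int.bor a

-- right fold of Nat `|||`
def orN (l : List Nat) : Nat := l.foldr (· ||| ·) 0

-- figures of pos not in ks, in first-occurrence order
def newOccs : List (Int × String) → List String → List String
  | [], _ => []
  | p :: t, ks => if p.2 ∈ ks then newOccs t ks else p.2 :: newOccs t (ks ++ [p.2])

-- bitwise-or algebra on nonnegative integers
theorem pv_bor_nn {a b : Int} (ha : 0 ≤ a) (hb : 0 ≤ b) : 0 ≤ PySem.Int.bor a b := by
  rw [PySem.Int.bor_of_nonneg ha hb]; exact Int.natCast_nonneg _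

theorem pv_nat_lor_rcomm (x y z : Nat) : (x ||| y) ||| z = (x ||| z) ||| y := by
  apply Nat.eq_of_testBit_eq
  intro i
  simp only [Nat.testBit_or]
  cases x.testBit i <;> cases y.testBit i <;> cases z.testBit i <;> rfl

theorem pv_nat_lor_absorb (x w b : Nat) : (x ||| w) ||| (w ||| b) = x ||| (w ||| b) := by
  apply Nat.eq_of_testBit_eq
  intro i
  simp only [Nat.testBit_or]
  cases x.testBit i <;> cases w.testBit i <;> cases b.testBit i <;> rfl

theorem pv_bor_rcomm {x y z : Int} (hx : 0 ≤ x) (hy : 0 ≤ y) (hz : 0 ≤ z) :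
    PySem.Int.bor (PySem.Int.bor x y) z = PySem.Int.bor (PySem.Int.bor x z) y := by
  rw [PySem.Int.bor_of_nonneg hx hy, PySem.Int.bor_of_nonneg hx hz,
      PySem.Int.bor_of_nonneg (by positivity) hz, PySem.Int.bor_of_nonneg (by positivity) hy,
      Int.toNat_natCast, Int.toNat_natCast, pv_nat_lor_rcomm]

theorem pv_bor_absorb {x w b : Int} (hx : 0 ≤ x) (hw : 0 ≤ w) (hb : 0 ≤ b) :
    PySem.Int.bor (PySem.Int.bor x w) (PySem.Int.bor w b) = PySem.Int.bor x (PySem.Int.bor w b) := by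
  rw [PySem.Int.bor_of_nonneg hw hb, PySem.Int.bor_of_nonneg hx hw,
      PySem.Int.bor_of_nonneg (by positivity) (by positivity),
      PySem.Int.bor_of_nonneg hx (by positivity),
      Int.toNat_natCast, Int.toNat_natCast, pv_nat_lor_absorb]

theorem pvShift_eq (i : Int) : pvShift i = (((2 ^ i.toNat : Nat) : Nat) : Int) := by
  unfold pvShift
  rw [Int.shiftLeft_eq, one_mul]
  push_cast
  ring

theorem pvShift_nn (i : Int) : 0 ≤ pvShift i := by
  rw [pvShift_eq]; exact Int.natCast_nonneg _

theorem pvShift_toNat (i : Int) : (pvShift i).toNat = 2 ^ i.toNat := by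
  rw [pvShift_eq, Int.toNat_natCast]

-- pvOrAt: nonnegativity, commutation, absorption
theorem pv_orAt_nn {a : List Int} {y : Int} (ha : ∀ x ∈ a, 0 ≤ x) (hy : 0 ≤ y) (u : Bool) :
    ∀ x ∈ pvOrAt a u y, 0 ≤ x := by
  match a with
  | [a0, a1] =>
    have h0 : (0:Int) ≤ a0 := ha a0 (by simp)
    have h1 : (0:Int) ≤ a1 := ha a1 (by simp)
    cases u <;> simp [pvOrAt] <;>
      exact ⟨by first | exact pv_bor_nn h0 hy | exact h0, by first | exact pv_bor_nn h1 hy | exact h1⟩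
  | [] => intro x hx; simp [pvOrAt] at hx
  | [a0] => simpa [pvOrAt] using ha
  | a0 :: a1 :: a2 :: rest => simpa [pvOrAt] using ha

theorem pv_orAt_comm {a : List Int} {y1 y2 : Int} (ha : ∀ x ∈ a, 0 ≤ x)
    (h1 : 0 ≤ y1) (h2 : 0 ≤ y2) (u1 u2 : Bool) :
    pvOrAt (pvOrAt a u1 y1) u2 y2 = pvOrAt (pvOrAt a u2 y2) u1 y1 := by
  match a with
  | [a0, a1] =>
    have h0 : (0:Int) ≤ a0 := ha a0 (by simp)
    have h1' : (0:Int) ≤ a1 := ha a1 (by simp)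
    cases u1 <;> cases u2 <;> simp [pvOrAt] <;>
      first
        | rfl
        | exact pv_bor_rcomm h0 h1 h2
        | exact pv_bor_rcomm h1' h1 h2
  | [] => rfl
  | [a0] => rfl
  | a0 :: a1 :: a2 :: rest => rfl

theorem pv_orAt_absorb {A : List Int} {w b : Int} (hA : ∀ x ∈ A, 0 ≤ x)
    (hw : 0 ≤ w) (hb : 0 ≤ b) (u : Bool) :
    pvOrAt (pvOrAt A u w) u (PySem.Int.bor w b) = pvOrAt A u (PySem.Int.bor w b) := by
  match A with
  | [a0, a1] =>
    have h0 : (0:Int) ≤ a0 := hA a0 (by simp)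
    have h1 : (0:Int) ≤ a1 := hA a1 (by simp)
    cases u <;> simp [pvOrAt] <;>
      first
        | exact pv_bor_absorb h0 hw hb
        | exact pv_bor_absorb h1 hw hb
  | [] => rfl
  | [a0] => rfl
  | a0 :: a1 :: a2 :: rest => rfl

-- spL: unfolding, nonnegativity, commuting a pvOrAt past it
theorem spL_cons (f : String) (w : Int) (t : List (String × Int)) (a : List Int) :
    spL ((f, w) :: t) a = spL t (pvOrAt a (pyIsupperStr f) w) := rfl

theorem spL_nn {l : List (String × Int)} {a : List Int}
    (hl : ∀ p ∈ l, 0 ≤ p.2) (ha : ∀ x ∈ a, 0 ≤ x) : ∀ x ∈ spL l a, 0 ≤ x := by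
  induction l generalizing a with
  | nil => simpa [spL] using ha
  | cons p t ih =>
    rw [show p = (p.1, p.2) from rfl, spL_cons]
    exact ih (fun q hq => hl q (List.mem_cons_of_mem _ hq))
      (pv_orAt_nn ha (hl p (List.mem_cons_self)) _)

theorem spL_orAt {l : List (String × Int)} {a : List Int} {y : Int}
    (hl : ∀ p ∈ l, 0 ≤ p.2) (ha : ∀ x ∈ a, 0 ≤ x) (hy : 0 ≤ y) (u : Bool) :
    spL l (pvOrAt a u y) = pvOrAt (spL l a) u y := by
  induction l generalizing a with
  | nil => rfl
  | cons p t ih =>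
    rw [show p = (p.1, p.2) from rfl, spL_cons, spL_cons,
        pv_orAt_comm ha hy (hl p List.mem_cons_self) u (pyIsupperStr p.1)]
    exact ih (fun q hq => hl q (List.mem_cons_of_mem _ hq))
      (pv_orAt_nn ha (hl p List.mem_cons_self) _)

-- dict facts at the item-list level
theorem pv_getD_if (d : PySem.Dict String Int) (k : String) :
    (if d.contains k = false then 0 else d.getD k 0) = d.getD k 0 := by
  by_cases h : d.contains k
  · simp [h]
  · have : d.items.find? (fun p => p.1 == k) = none := by
      rw [List.find?_eq_none]
      intro p hp
      by_contra hc
      exact h (List.any_eq_true.mpr ⟨p, hp, by simpa using hc⟩)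
    simp [h, PySem.Dict.getD, PySem.Dict.get?, this]

theorem pv_getD_nn {d : PySem.Dict String Int} (h : ∀ p ∈ d.items, 0 ≤ p.2) (k : String) :
    0 ≤ d.getD k 0 := by
  unfold PySem.Dict.getD PySem.Dict.get?
  cases hf : d.items.find? (fun p => p.1 == k) with
  | none => simp
  | some p => simpa using h p (List.mem_of_find?_eq_some hf)

theorem pv_insert_nn {d : PySem.Dict String Int} {v : Int}
    (h : ∀ p ∈ d.items, 0 ≤ p.2) (hv : 0 ≤ v) (k : String) :
    ∀ p ∈ (d.insert k v).items, 0 ≤ p.2 := by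
  intro p hp
  unfold PySem.Dict.insert at hp
  by_cases hc : d.contains k
  · simp only [hc, if_true] at hp
    obtain ⟨q, hq, hqe⟩ := List.mem_map.mp hp
    by_cases hqk : q.1 == k
    · simp [hqk] at hqe; rw [← hqe]; exact hv
    · simp [hqk] at hqe; rw [← hqe]; exact h q hq
  · simp only [hc] at hp
    rcases List.mem_append.mp hp with h1 | h2
    · exact h p h1
    · simp at h2; rw [h2]; exact hv

theorem pv_insert_nodup {d : PySem.Dict String Int} {v : Int}
    (h : (d.items.map Prod.fst).Nodup) (k : String) :
    (((d.insert k v).items).map Prod.fst).Nodup := by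
  by_cases hc : d.contains k
  · have hitems : (d.insert k v).items
        = d.items.map (fun p => if (p.1 == k) = true then (k, v) else p) := by
      simp [PySem.Dict.insert, hc]
    rw [hitems, List.map_map]
    have hfun : ∀ p ∈ d.items,
        (Prod.fst ∘ fun p => if (p.1 == k) = true then (k, v) else p) p = p.1 := by
      intro p _
      by_cases hpk : p.1 = k
      · simp [hpk]
      · simp [hpk]
    rw [List.map_congr_left hfun]
    exact h
  · have hc' : d.contains k = false := by simpa using hc
    have hitems : (d.insert k v).items = d.items ++ [(k, v)] := by
      simp [PySem.Dict.insert, hc']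
    have hk_not : k ∉ d.items.map Prod.fst := by
      intro hmem
      obtain ⟨p, hp, hpe⟩ := List.mem_map.mp hmem
      have hany : d.items.any (fun p => p.1 == k) = true :=
        List.any_eq_true.mpr ⟨p, hp, by simp [hpe]⟩
      rw [show d.items.any (fun p => p.1 == k) = d.contains k from rfl, hc'] at hany
      exact Bool.false_ne_true hany
    rw [hitems, List.map_append]
    refine List.Nodup.append h (List.nodup_singleton _) ?_
    intro x hx hx2
    have hx2' : x = k := by simpa using hx2
    subst hx2'
    exact hk_not hx

-- the key lemma of stage 1: inserting fig ↦ (old | b) and then running the colour pass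
-- equals running the colour pass on the old dict and or-ing (old | b) in afterwards
theorem spL_insert (d : PySem.Dict String Int) (k : String) (b : Int) (a : List Int)
    (hv : ∀ p ∈ d.items, 0 ≤ p.2) (hk : (d.items.map Prod.fst).Nodup)
    (hb : 0 ≤ b) (ha : ∀ x ∈ a, 0 ≤ x) :
    spL (d.insert k (PySem.Int.bor (d.getD k 0) b)).items a
      = pvOrAt (spL d.items a) (pyIsupperStr k) (PySem.Int.bor (d.getD k 0) b) := by
  obtain ⟨l⟩ := d
  induction l generalizing a with
  | nil => rfl
  | cons p t ih =>
    obtain ⟨f, w⟩ := p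
    have hw : (0:Int) ≤ w := hv (f, w) List.mem_cons_self
    have hvt : ∀ q ∈ t, 0 ≤ q.2 := fun q hq => hv q (List.mem_cons_of_mem _ hq)
    have hk' : (f :: t.map Prod.fst).Nodup := by simpa using hk
    have hkt : (t.map Prod.fst).Nodup := (List.nodup_cons.mp hk').2
    by_cases hfk : f == k
    · have hf : f = k := eq_of_beq hfk
      have hnot : ∀ q ∈ t, ¬(q.1 == k) = true := by
        intro q hq hqk
        apply (List.nodup_cons.mp hk').1
        rw [hf, ← eq_of_beq hqk]
        exact List.mem_map.mpr ⟨q, hq, rfl⟩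
      have hfind : ((f, w) :: t).find? (fun p => p.1 == k) = some (f, w) := by
        simp [List.find?, hfk]
      have hget : (PySem.Dict.mk ((f, w) :: t)).getD k 0 = w := by
        simp [PySem.Dict.getD, PySem.Dict.get?, hfind]
      have hmap : t.map (fun p => if (p.1 == k) = true then (k, PySem.Int.bor w b) else p) = t := by
        have := List.map_congr_left (l := t)
          (f := fun p => if (p.1 == k) = true then (k, PySem.Int.bor w b) else p)
          (g := id) (by intro q hq; simp [hnot q hq])
        simpa using this
      have hcont : (PySem.Dict.mk ((f, w) :: t)).contains k = true := by
        simp [PySem.Dict.contains, hfk]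
      rw [hget]
      have hitems : (PySem.Dict.insert ⟨(f, w) :: t⟩ k (PySem.Int.bor w b)).items
          = (k, PySem.Int.bor w b) :: t := by
        simp only [PySem.Dict.insert, hcont, if_true, List.map_cons]
        rw [if_pos hfk, hmap]
      rw [hitems, spL_cons, show (PySem.Dict.mk ((f, w) :: t)).items = (f, w) :: t from rfl,
          spL_cons, spL_orAt hvt ha (pv_bor_nn hw hb) _,
          spL_orAt hvt ha hw _, hf]
      exact (pv_orAt_absorb (spL_nn hvt ha) hw hb _).symm
    · have hfind : ((f, w) :: t).find? (fun p => p.1 == k) = t.find? (fun p => p.1 == k) := by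
        simp [List.find?, hfk]
      have hget : (PySem.Dict.mk ((f, w) :: t)).getD k 0 = (PySem.Dict.mk t).getD k 0 := by
        simp [PySem.Dict.getD, PySem.Dict.get?, hfind]
      rw [hget]
      have hitems : (PySem.Dict.insert ⟨(f, w) :: t⟩ k
            (PySem.Int.bor ((PySem.Dict.mk t).getD k 0) b)).items
          = (f, w) :: (PySem.Dict.insert ⟨t⟩ k
            (PySem.Int.bor ((PySem.Dict.mk t).getD k 0) b)).items := by
        by_cases hany : t.any (fun p => p.1 == k)
        · have hc1 : (PySem.Dict.mk ((f, w) :: t)).contains k = true := by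
            simp [PySem.Dict.contains, hany]
          have hc2 : (PySem.Dict.mk t).contains k = true := by
            simp [PySem.Dict.contains, hany]
          simp only [PySem.Dict.insert, hc1, hc2, if_true, List.map_cons]
          rw [if_neg hfk]
        · have hc1 : (PySem.Dict.mk ((f, w) :: t)).contains k = false := by
            simp [PySem.Dict.contains, hany, hfk]
          have hc2 : (PySem.Dict.mk t).contains k = false := by
            simp [PySem.Dict.contains, hany]
          simp only [PySem.Dict.insert, hc1, hc2, Bool.false_eq_true, if_false, List.cons_append]
      rw [hitems, spL_cons, show (PySem.Dict.mk ((f, w) :: t)).items = (f, w) :: t from rfl,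
          spL_cons]
      exact ih _ (pv_orAt_nn ha hw _) hvt hkt

-- stage 1: A's loop = dict building (pvStepB) + colour pass over the finished items
theorem pv_main (pos : List (Int × String)) :
    ∀ (d : PySem.Dict String Int) (a : List Int),
      (∀ p ∈ d.items, 0 ≤ p.2) → (d.items.map Prod.fst).Nodup →
      (∀ p ∈ pos, 0 ≤ p.1) →
      a = spL d.items [0, 0] →
      pos.foldl pvStepA (d, a)
        = (pos.foldl pvStepB d, spL (pos.foldl pvStepB d).items [0, 0]) := by
  induction pos with
  | nil =>
    intro d a _ _ _ ha
    simp [ha]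
  | cons p t ih =>
    intro d a hv hk hpre ha
    obtain ⟨i, fig⟩ := p
    have hbit : (0:Int) ≤ pvShift i := pvShift_nn _
    have hgd : (0:Int) ≤ d.getD fig 0 := pv_getD_nn hv fig
    have hboard : (0:Int) ≤ PySem.Int.bor (d.getD fig 0) (pvShift i) :=
      pv_bor_nn hgd hbit
    have hstep : pvStepA (d, a) (i, fig)
        = (d.insert fig (PySem.Int.bor (d.getD fig 0) (pvShift i)),
           pvOrAt a (pyIsupperStr fig) (PySem.Int.bor (d.getD fig 0) (pvShift i))) := by
      show (_, _) = _
      rw [pv_getD_if]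
    have ha0 : ∀ x ∈ ([0, 0] : List Int), 0 ≤ x := by decide
    rw [List.foldl_cons, List.foldl_cons, hstep]
    exact ih _ _
      (pv_insert_nn hv hboard fig)
      (pv_insert_nodup hk fig)
      (fun q hq => hpre q (List.mem_cons_of_mem _ hq))
      (by rw [ha, ← spL_insert d fig _ [0, 0] hv hk hbit ha0])

-- ==== stage 2: grouped characterisation of the dict built by pvStepB ====

theorem newOccs_not_mem : ∀ (pos : List (Int × String)) (ks : List String) (g : String),
    g ∈ newOccs pos ks → g ∉ ks := by
  intro pos
  induction pos with
  | nil => intro ks g h; simp [newOccs] at h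
  | cons p t ih =>
    intro ks g h
    by_cases hm : p.2 ∈ ks
    · rw [newOccs, if_pos hm] at h; exact ih ks g h
    · rw [newOccs, if_neg hm] at h
      rcases List.mem_cons.mp h with h1 | h2
      · rw [h1]; exact hm
      · intro hg
        exact ih (ks ++ [p.2]) g h2 (List.mem_append_left _ hg)

theorem newOccs_nodup : ∀ (pos : List (Int × String)) (ks : List String),
    (newOccs pos ks).Nodup := by
  intro pos
  induction pos with
  | nil => intro ks; simp [newOccs]
  | cons p t ih =>
    intro ks
    by_cases hm : p.2 ∈ ks
    · rw [newOccs, if_pos hm]; exact ih ks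
    · rw [newOccs, if_neg hm]
      refine List.nodup_cons.mpr ⟨?_, ih _⟩
      intro hmem
      exact newOccs_not_mem t (ks ++ [p.2]) p.2 hmem (by simp)

-- B's order loop builds exactly newOccs
theorem pv_order_eq : ∀ (pos : List (Int × String)) (acc : List String),
    pos.foldl (fun acc p => if acc.contains p.2 then acc else acc ++ [p.2]) acc
      = acc ++ newOccs pos acc := by
  intro pos
  induction pos with
  | nil => intro acc; simp [newOccs]
  | cons p t ih =>
    intro acc
    rw [List.foldl_cons]
    by_cases hm : p.2 ∈ acc
    · have hc : acc.contains p.2 = true := by simpa [List.contains_eq_mem]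
      rw [if_pos hc, ih, newOccs, if_pos hm]
    · have hc : ¬ acc.contains p.2 = true := by simp [List.contains_eq_mem, hm]
      rw [if_neg hc, ih, newOccs, if_neg hm, List.append_assoc]
      rfl

theorem pv_contains_iff (d : PySem.Dict String Int) (f : String) :
    d.contains f = true ↔ f ∈ d.items.map Prod.fst := by
  simp [PySem.Dict.contains, List.any_eq_true, List.mem_map]

theorem pv_getD_zero_of_not_contains {d : PySem.Dict String Int} {f : String}
    (h : d.contains f = false) : d.getD f 0 = 0 := by
  have hfind : d.items.find? (fun p => p.1 == f) = none := by
    rw [List.find?_eq_none]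
    intro p hp hc
    have : d.contains f = true := List.any_eq_true.mpr ⟨p, hp, hc⟩
    rw [h] at this; exact Bool.false_ne_true this
  simp [PySem.Dict.getD, PySem.Dict.get?, hfind]

theorem pv_find_eq_of_mem_nodup {f : String} {v : Int} :
    ∀ (l : List (String × Int)), (l.map Prod.fst).Nodup → (f, v) ∈ l →
      l.find? (fun p => p.1 == f) = some (f, v) := by
  intro l
  induction l with
  | nil => intro _ h; simp at h
  | cons q t ih =>
    intro hnd hm
    have hnd' : q.1 ∉ t.map Prod.fst ∧ (t.map Prod.fst).Nodup := by
      rw [List.map_cons] at hnd; exact List.nodup_cons.mp hnd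
    by_cases hq : q.1 == f
    · have hqf : q.1 = f := eq_of_beq hq
      have : q = (f, v) := by
        rcases List.mem_cons.mp hm with h1 | h2
        · exact h1.symm
        · exfalso
          exact hnd'.1 (by rw [hqf]; exact List.mem_map.mpr ⟨(f, v), h2, rfl⟩)
      rw [List.find?_cons, hq]; simp [this]
    · have : (f, v) ∈ t := by
        rcases List.mem_cons.mp hm with h1 | h2
        · exfalso; apply hq; rw [← h1]; simp
        · exact h2
      rw [List.find?_cons]
      simp only [hq]
      exact ih hnd'.2 this

theorem pv_getD_of_mem_nodup {d : PySem.Dict String Int} {f : String} {v : Int}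
    (hnd : (d.items.map Prod.fst).Nodup) (hm : (f, v) ∈ d.items) : d.getD f 0 = v := by
  simp [PySem.Dict.getD, PySem.Dict.get?, pv_find_eq_of_mem_nodup d.items hnd hm]

-- shL unfolds
theorem shL_cons_self (i : Int) (f : String) (t : List (Int × String)) :
    shL ((i, f) :: t) f = (pvShift i) :: shL t f := by
  unfold shL
  rw [List.filter_cons, if_pos (by simp), List.map_cons]

theorem shL_cons_ne {g f : String} (h : g ≠ f) (i : Int) (t : List (Int × String)) :
    shL ((i, f) :: t) g = shL t g := by
  simp [shL, show (f == g) = false by simpa using fun he => h he.symm]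

theorem orF_cons (a s : Int) (l : List Int) : orF a (s :: l) = orF (PySem.Int.bor a s) l := rfl

-- insert items shapes
theorem pv_insert_items_contains {d : PySem.Dict String Int} {f : String} (v : Int)
    (h : d.contains f = true) :
    (d.insert f v).items = d.items.map (fun p => if p.1 == f then (f, v) else p) := by
  simp [PySem.Dict.insert, h]

theorem pv_insert_items_new {d : PySem.Dict String Int} {f : String} (v : Int)
    (h : d.contains f = false) :
    (d.insert f v).items = d.items ++ [(f, v)] := by
  simp [PySem.Dict.insert, h]

theorem pv_insert_keys_contains {d : PySem.Dict String Int} {f : String} (v : Int)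
    (h : d.contains f = true) :
    (d.insert f v).items.map Prod.fst = d.items.map Prod.fst := by
  rw [pv_insert_items_contains v h, List.map_map]
  apply List.map_congr_left
  intro p _
  by_cases hp : p.1 = f
  · simp [hp]
  · simp [hp]

-- the grouped characterisation
theorem pv_grouped : ∀ (pos : List (Int × String)) (d : PySem.Dict String Int),
    (d.items.map Prod.fst).Nodup →
    (pos.foldl pvStepB d).items
      = d.items.map (fun q => (q.1, orF q.2 (shL pos q.1)))
        ++ (newOccs pos (d.items.map Prod.fst)).map (fun f => (f, orF 0 (shL pos f))) := by
  intro pos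
  induction pos with
  | nil =>
    intro d _
    simp [newOccs, shL, orF]
  | cons p t ih =>
    intro d hnd
    obtain ⟨i, f⟩ := p
    rw [List.foldl_cons]
    by_cases hc : d.contains f
    · -- key already present: in-place update, keys unchanged
      have hfk : f ∈ d.items.map Prod.fst := (pv_contains_iff d f).mp hc
      have hnd' : (((d.insert f (PySem.Int.bor (d.getD f 0) (pvShift i))).items).map Prod.fst).Nodup :=
        pv_insert_nodup hnd f
      have hIH := ih (d.insert f (PySem.Int.bor (d.getD f 0) (pvShift i))) hnd'
      show (t.foldl pvStepB (d.insert f (PySem.Int.bor (d.getD f 0) (pvShift i)))).items = _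
      rw [hIH, pv_insert_keys_contains _ hc, pv_insert_items_contains _ hc, List.map_map]
      congr 1
      · apply List.map_congr_left
        intro q hq
        simp only [Function.comp_apply]
        by_cases hqf : (q.1 == f) = true
        · have hq1 : q.1 = f := eq_of_beq hqf
          have hget : d.getD f 0 = q.2 := pv_getD_of_mem_nodup hnd (by rw [← hq1]; exact hq)
          rw [if_pos hqf]
          show ((f, PySem.Int.bor (d.getD f 0) (pvShift i)).1,
              orF (f, PySem.Int.bor (d.getD f 0) (pvShift i)).2
                (shL t (f, PySem.Int.bor (d.getD f 0) (pvShift i)).1))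
            = (q.1, orF q.2 (shL ((i, f) :: t) q.1))
          rw [hget, hq1, shL_cons_self, orF_cons]
        · have hq1 : q.1 ≠ f := by simpa using hqf
          rw [if_neg hqf]
          show ((q.1, orF q.2 (shL t q.1)) : String × Int)
            = (q.1, orF q.2 (shL ((i, f) :: t) q.1))
          rw [shL_cons_ne hq1]
      · rw [newOccs, if_pos hfk]
        apply List.map_congr_left
        intro g hg
        have : g ∉ d.items.map Prod.fst := newOccs_not_mem t _ g hg
        have hgf : g ≠ f := fun he => this (he ▸ hfk)
        show ((g, orF 0 (shL t g)) : String × Int) = (g, orF 0 (shL ((i, f) :: t) g))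
        rw [shL_cons_ne hgf]
    · -- new key: appended at the end
      have hc' : d.contains f = false := by simpa using hc
      have hfk : f ∉ d.items.map Prod.fst := fun hm => by
        rw [(pv_contains_iff d f).mpr hm] at hc'; exact Bool.true_eq_false.mp hc'
      have hget : d.getD f 0 = 0 := pv_getD_zero_of_not_contains hc'
      have hnd' : (((d.insert f (PySem.Int.bor (d.getD f 0) (pvShift i))).items).map Prod.fst).Nodup :=
        pv_insert_nodup hnd f
      have hkeys : ((d.insert f (PySem.Int.bor (d.getD f 0) (pvShift i))).items).map Prod.fst
          = d.items.map Prod.fst ++ [f] := by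
        rw [pv_insert_items_new _ hc', List.map_append]; rfl
      have hIH := ih (d.insert f (PySem.Int.bor (d.getD f 0) (pvShift i))) hnd'
      show (t.foldl pvStepB (d.insert f (PySem.Int.bor (d.getD f 0) (pvShift i)))).items = _
      have h1 : ∀ q ∈ d.items, ((q.1, orF q.2 (shL t q.1)) : String × Int)
          = (q.1, orF q.2 (shL ((i, f) :: t) q.1)) := by
        intro q hq
        have hq1 : q.1 ≠ f := fun he => hfk (he ▸ List.mem_map.mpr ⟨q, hq, rfl⟩)
        rw [shL_cons_ne hq1]
      have h2 : ((f, PySem.Int.bor (d.getD f 0) (pvShift i)).1,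
            orF (f, PySem.Int.bor (d.getD f 0) (pvShift i)).2
              (shL t (f, PySem.Int.bor (d.getD f 0) (pvShift i)).1))
          = ((f, orF 0 (shL ((i, f) :: t) f)) : String × Int) := by
        rw [hget, shL_cons_self, orF_cons]
      have h3 : ∀ g ∈ newOccs t (d.items.map Prod.fst ++ [f]),
          ((g, orF 0 (shL t g)) : String × Int) = (g, orF 0 (shL ((i, f) :: t) g)) := by
        intro g hg
        have : g ∉ d.items.map Prod.fst ++ [f] := newOccs_not_mem t _ g hg
        have hgf : g ≠ f := fun he => this (he ▸ List.mem_append_right _ (by simp))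
        rw [shL_cons_ne hgf]
      rw [hIH, hkeys, pv_insert_items_new _ hc']
      rw [newOccs, if_neg hfk, List.map_cons, List.map_append, List.map_cons, List.map_nil]
      rw [List.map_congr_left h1, h2, List.map_congr_left h3, List.append_assoc]
      rfl

-- the colour pass splits into two filtered or-folds
theorem pv_spL_split : ∀ (l : List (String × Int)) (a0 a1 : Int),
    spL l [a0, a1]
      = [orF a0 ((l.filter (fun q => !(pyIsupperStr q.1))).map Prod.snd),
         orF a1 ((l.filter (fun q => pyIsupperStr q.1)).map Prod.snd)] := by
  intro l
  induction l with
  | nil => intro a0 a1; rfl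
  | cons q t ih =>
    intro a0 a1
    obtain ⟨g, w⟩ := q
    rw [spL_cons]
    cases h : pyIsupperStr g with
    | false =>
      rw [show pvOrAt [a0, a1] false w = [PySem.Int.bor a0 w, a1] from rfl, ih]
      simp [h, orF_cons]
    | true =>
      rw [show pvOrAt [a0, a1] true w = [a0, PySem.Int.bor a1 w] from rfl, ih]
      simp [h, orF_cons]

-- ==== stage 3: Nat bit arithmetic — OR of disjoint numbers is their sum ====

theorem pv_or_eq_add (a : Nat) : ∀ b : Nat, a &&& b = 0 → a ||| b = a + b := by
  induction a using Nat.binaryRec with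
  | zero => intro b _; simp
  | bit ba a' ih =>
    intro b h
    rw [← Nat.bit_testBit_zero_shiftRight_one b] at h ⊢
    rw [Nat.land_bit] at h
    rw [Nat.lor_bit]
    rw [Nat.bit_eq_zero_iff] at h
    have h2 := ih _ h.1
    cases ba <;> cases hb : b.testBit 0 <;>
      simp [hb, Nat.bit, h2] at h ⊢ <;> omega

theorem pv_orN_testBit (l : List Nat) (k : Nat) :
    (orN l).testBit k = l.any (fun x => x.testBit k) := by
  induction l with
  | nil => simp [orN]
  | cons x t ih => simp [orN, Nat.testBit_or] at ih ⊢; rw [ih]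

theorem pv_and_orN_zero {a : Nat} {l : List Nat} (h : ∀ x ∈ l, a &&& x = 0) :
    a &&& orN l = 0 := by
  apply Nat.eq_of_testBit_eq
  intro k
  rw [Nat.testBit_land, pv_orN_testBit, Nat.zero_testBit]
  by_cases ha : a.testBit k
  · rw [ha, Bool.true_and]
    rw [List.any_eq_false]
    intro x hx
    have := congrArg (fun n => n.testBit k) (h x hx)
    simp only [Nat.testBit_land, Nat.zero_testBit, ha, Bool.true_and] at this
    simp [this]
  · simp [ha]

theorem pv_orN_eq_sum {l : List Nat} (h : l.Pairwise (fun a b => a &&& b = 0)) :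
    orN l = l.sum := by
  induction l with
  | nil => rfl
  | cons x t ih =>
    have hp := List.pairwise_cons.mp h
    have : orN (x :: t) = x ||| orN t := rfl
    rw [this, pv_or_eq_add _ _ (pv_and_orN_zero hp.1), ih hp.2, List.sum_cons]

theorem pv_pow_and_pow {a b : Nat} (h : a ≠ b) : 2 ^ a &&& 2 ^ b = 0 := by
  apply Nat.eq_of_testBit_eq
  intro k
  rw [Nat.testBit_land, Nat.testBit_two_pow, Nat.testBit_two_pow, Nat.zero_testBit]
  by_cases hak : a = k
  · subst hak; simp [Ne.symm h]
  · simp [hak]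

-- ==== stage 4: Int ↔ Nat lifting ====

theorem pv_orF_toNat : ∀ (l : List Int) (a : Int), 0 ≤ a → (∀ x ∈ l, 0 ≤ x) →
    orF a l = ((a.toNat ||| orN (l.map Int.toNat) : Nat) : Int) := by
  intro l
  induction l with
  | nil =>
    intro a ha _
    simp [orF, orN, Int.toNat_of_nonneg ha]
  | cons x t ih =>
    intro a ha hl
    have hx : (0:Int) ≤ x := hl x (by simp)
    rw [orF_cons, ih _ (pv_bor_nn ha hx) (fun y hy => hl y (List.mem_cons_of_mem _ hy))]
    rw [PySem.Int.bor_of_nonneg ha hx, Int.toNat_natCast]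
    have : orN ((x :: t).map Int.toNat) = x.toNat ||| orN (t.map Int.toNat) := rfl
    rw [this, ← Nat.lor_assoc]

theorem pv_sum_toNat : ∀ (l : List Int), (∀ x ∈ l, 0 ≤ x) →
    l.sum = (((l.map Int.toNat).sum : Nat) : Int) := by
  intro l
  induction l with
  | nil => intro _; simp
  | cons x t ih =>
    intro h
    have hx : (0:Int) ≤ x := h x (by simp)
    rw [List.sum_cons, ih (fun y hy => h y (List.mem_cons_of_mem _ hy)), List.map_cons,
        List.sum_cons]
    push_cast
    rw [Int.toNat_of_nonneg hx]

-- ==== stage 5: supports of the boards ====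

theorem pv_shL_nn (pos : List (Int × String)) (f : String) :
    ∀ x ∈ shL pos f, 0 ≤ x := by
  intro x hx
  obtain ⟨p, _, he⟩ := List.mem_map.mp hx
  rw [← he]; exact pvShift_nn _

theorem pv_shL_toNat (pos : List (Int × String)) (f : String) :
    (shL pos f).map Int.toNat = (nsOf pos f).map (2 ^ ·) := by
  simp only [shL, nsOf, List.map_map]
  apply List.map_congr_left
  intro p _
  simp only [Function.comp_apply]
  rw [pvShift_toNat]

-- the board of f, as a Nat
theorem pv_board_eq (pos : List (Int × String)) (f : String) :
    orF 0 (shL pos f) = ((orN ((nsOf pos f).map (2 ^ ·)) : Nat) : Int) := by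
  rw [pv_orF_toNat _ 0 le_rfl (pv_shL_nn pos f), pv_shL_toNat,
      show (0:Int).toNat = 0 from rfl, Nat.zero_or]

theorem pv_board_nn (pos : List (Int × String)) (f : String) : 0 ≤ orF 0 (shL pos f) := by
  rw [pv_board_eq]; exact Int.natCast_nonneg _

theorem pv_board_testBit (pos : List (Int × String)) (f : String) (k : Nat) :
    ((orF 0 (shL pos f)).toNat).testBit k = true ↔ k ∈ nsOf pos f := by
  rw [pv_board_eq, Int.toNat_natCast, pv_orN_testBit]
  simp only [List.any_map, List.any_eq_true, Function.comp_apply, Nat.testBit_two_pow]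
  constructor
  · rintro ⟨n, hn, he⟩; exact (of_decide_eq_true he) ▸ hn
  · intro hk; exact ⟨k, hk, by simp⟩

theorem pv_nsOf_nodup {pos : List (Int × String)} (hnd : (pos.map Prod.fst).Nodup)
    (hpre : ∀ p ∈ pos, 0 ≤ p.1) (f : String) : (nsOf pos f).Nodup := by
  have h1 : ((pos.filter (fun p => p.2 == f)).map Prod.fst).Nodup :=
    hnd.sublist ((pos.filter_sublist).map Prod.fst)
  have : nsOf pos f = ((pos.filter (fun p => p.2 == f)).map Prod.fst).map Int.toNat := by
    simp [nsOf, List.map_map]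
  rw [this]
  apply h1.map_on
  intro x hx y hy he
  obtain ⟨p, hp, hpe⟩ := List.mem_map.mp hx
  obtain ⟨q, hq, hqe⟩ := List.mem_map.mp hy
  have hx0 : 0 ≤ x := hpe ▸ hpre p (List.mem_of_mem_filter hp)
  have hy0 : 0 ≤ y := hqe ▸ hpre q (List.mem_of_mem_filter hq)
  omega

theorem pv_nsOf_disjoint {pos : List (Int × String)} (hnd : (pos.map Prod.fst).Nodup)
    (hpre : ∀ p ∈ pos, 0 ≤ p.1) {f g : String} (hfg : f ≠ g) :
    ∀ k, k ∈ nsOf pos f → k ∉ nsOf pos g := by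
  intro k hkf hkg
  obtain ⟨p, hp, hpe⟩ := List.mem_map.mp hkf
  obtain ⟨q, hq, hqe⟩ := List.mem_map.mp hkg
  have hpf : p.2 = f := by simpa using (List.mem_filter.mp hp).2
  have hqg : q.2 = g := by simpa using (List.mem_filter.mp hq).2
  have hp' : p ∈ pos := List.mem_of_mem_filter hp
  have hq' : q ∈ pos := List.mem_of_mem_filter hq
  have hp0 : 0 ≤ p.1 := hpre p hp'
  have hq0 : 0 ≤ q.1 := hpre q hq'
  have h1 : p.1 = q.1 := by omega
  have : p = q := List.inj_on_of_nodup_map hnd hp' hq' h1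
  exact hfg (hpf ▸ hqg ▸ congrArg Prod.snd this)

theorem pv_boards_and_zero {pos : List (Int × String)} (hnd : (pos.map Prod.fst).Nodup)
    (hpre : ∀ p ∈ pos, 0 ≤ p.1) {f g : String} (hfg : f ≠ g) :
    (orF 0 (shL pos f)).toNat &&& (orF 0 (shL pos g)).toNat = 0 := by
  apply Nat.eq_of_testBit_eq
  intro k
  rw [Nat.testBit_land, Nat.zero_testBit]
  by_cases hf : ((orF 0 (shL pos f)).toNat).testBit k
  · rw [hf, Bool.true_and]
    by_cases hg : ((orF 0 (shL pos g)).toNat).testBit k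
    · exfalso
      exact pv_nsOf_disjoint hnd hpre hfg k ((pv_board_testBit pos f k).mp hf)
        ((pv_board_testBit pos g k).mp hg)
    · simpa using hg
  · simp [hf]

-- board OR-fold equals board sum (per figure)
theorem pv_board_or_eq_sum {pos : List (Int × String)} (hnd : (pos.map Prod.fst).Nodup)
    (hpre : ∀ p ∈ pos, 0 ≤ p.1) (f : String) :
    orF 0 (shL pos f) = (shL pos f).sum := by
  rw [pv_board_eq, pv_sum_toNat _ (pv_shL_nn pos f), pv_shL_toNat]
  congr 1
  apply pv_orN_eq_sum
  exact ((pv_nsOf_nodup hnd hpre f).pairwise_of_forall_ne (by intro a b _ _ h; exact h)).map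
    (2 ^ ·) (by intro a b h; exact pv_pow_and_pow h)

-- or-fold of a list of pairwise-disjoint boards equals its sum
theorem pv_orF_boards_eq_sum {l : List Int} (hl : ∀ x ∈ l, 0 ≤ x)
    (hp : (l.map Int.toNat).Pairwise (fun a b => a &&& b = 0)) :
    orF 0 l = l.sum := by
  rw [pv_orF_toNat _ 0 le_rfl hl, pv_sum_toNat _ hl, show (0:Int).toNat = 0 from rfl,
      Nat.zero_or, pv_orN_eq_sum hp]

-- ==== stage 6: assembly ====

theorem gen_pieces_bb_eq (position : List (Int × String))
    (hpre0 : ∀ p ∈ position, 0 ≤ p.1) (hnd : (position.map Prod.fst).Nodup) :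
    gen_pieces_bb position = gen_pieces_bb_alt position := by
  -- common abbreviations
  set occ := newOccs position [] with hocc
  set items := occ.map (fun f => (f, orF 0 (shL position f))) with hitems
  -- stage 1: A = (dict, colour pass, or of the two)
  have hmain := pv_main position PySem.Dict.empty [0, 0]
    (by intro p hp; simp [PySem.Dict.empty] at hp)
    (by simp [PySem.Dict.empty])
    hpre0 rfl
  -- stage 2: the dict's items in grouped form
  have hgrp : (position.foldl pvStepB PySem.Dict.empty).items = items := by
    rw [pv_grouped position PySem.Dict.empty (by simp [PySem.Dict.empty])]
    simp [PySem.Dict.empty, hitems, hocc]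
  -- B's bb equals items (per-figure or = sum)
  have hbbB : occ.map (fun f =>
      (f, ((position.filter (fun p => p.2 == f)).map (fun p => pvShift p.1)).sum))
      = items := by
    rw [hitems]
    apply List.map_congr_left
    intro f _
    rw [show ((position.filter (fun p => p.2 == f)).map (fun p => pvShift p.1))
        = shL position f from rfl]
    rw [pv_board_or_eq_sum hnd hpre0 f]
  -- the two filtered board lists
  set lows := ((items.filter (fun q => !(pyIsupperStr q.1))).map Prod.snd) with hlows
  set highs := ((items.filter (fun q => pyIsupperStr q.1)).map Prod.snd) with hhighs
  have hlow_mem : ∀ x ∈ lows, ∃ f, (¬ pyIsupperStr f = true) ∧ x = orF 0 (shL position f) := by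
    intro x hx
    obtain ⟨q, hq, hqe⟩ := List.mem_map.mp hx
    obtain ⟨hq1, hq2⟩ := List.mem_filter.mp hq
    obtain ⟨f, _, hfe⟩ := List.mem_map.mp hq1
    refine ⟨f, ?_, ?_⟩
    · rw [← hfe] at hq2; simpa using hq2
    · rw [← hqe, ← hfe]
  have hhigh_mem : ∀ x ∈ highs, ∃ f, (pyIsupperStr f = true) ∧ x = orF 0 (shL position f) := by
    intro x hx
    obtain ⟨q, hq, hqe⟩ := List.mem_map.mp hx
    obtain ⟨hq1, hq2⟩ := List.mem_filter.mp hq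
    obtain ⟨f, _, hfe⟩ := List.mem_map.mp hq1
    refine ⟨f, ?_, ?_⟩
    · rw [← hfe] at hq2; exact hq2
    · rw [← hqe, ← hfe]
  have hlows_nn : ∀ x ∈ lows, 0 ≤ x := by
    intro x hx; obtain ⟨f, _, he⟩ := hlow_mem x hx; rw [he]; exact pv_board_nn _ _
  have hhighs_nn : ∀ x ∈ highs, 0 ≤ x := by
    intro x hx; obtain ⟨f, _, he⟩ := hhigh_mem x hx; rw [he]; exact pv_board_nn _ _
  -- pairwise disjointness inside each colour class
  have hclass : ∀ (c : Bool),
      (((items.filter (fun q => pyIsupperStr q.1 == c)).map Prod.snd).map Int.toNat).Pairwise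
        (fun a b => a &&& b = 0) := by
    intro c
    have hocc_nd : occ.Nodup := newOccs_nodup position []
    have h1 : (items.filter (fun q => pyIsupperStr q.1 == c))
        = (occ.filter (fun f => pyIsupperStr f == c)).map (fun f => (f, orF 0 (shL position f))) := by
      rw [hitems, List.filter_map]
      rfl
    rw [h1, List.map_map, List.map_map]
    apply List.Pairwise.map
    · intro f g h
      exact h
    · apply List.Pairwise.filter
      apply (hocc_nd.pairwise_of_forall_ne ?_).imp
      · intro f g hfg
        exact pv_boards_and_zero hnd hpre0 hfg
      · intro a b _ _ h; exact h
  have hlowsP : (lows.map Int.toNat).Pairwise (fun a b => a &&& b = 0) := by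
    have : (items.filter (fun q => !(pyIsupperStr q.1)))
        = (items.filter (fun q => pyIsupperStr q.1 == false)) := by
      apply List.filter_congr; intro q _; cases pyIsupperStr q.1 <;> rfl
    rw [hlows, this]; exact hclass false
  have hhighsP : (highs.map Int.toNat).Pairwise (fun a b => a &&& b = 0) := by
    have : (items.filter (fun q => pyIsupperStr q.1))
        = (items.filter (fun q => pyIsupperStr q.1 == true)) := by
      apply List.filter_congr; intro q _; cases pyIsupperStr q.1 <;> rfl
    rw [hhighs, this]; exact hclass true
  -- low/high or-folds equal sums
  have hlow_eq : orF 0 lows = lows.sum := pv_orF_boards_eq_sum hlows_nn hlowsP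
  have hhigh_eq : orF 0 highs = highs.sum := pv_orF_boards_eq_sum hhighs_nn hhighsP
  -- cross-class disjointness for the final or
  have hcross : (orF 0 lows).toNat &&& (orF 0 highs).toNat = 0 := by
    rw [pv_orF_toNat _ 0 le_rfl hlows_nn, pv_orF_toNat _ 0 le_rfl hhighs_nn,
        Int.toNat_natCast, Int.toNat_natCast, show (0:Int).toNat = 0 from rfl,
        Nat.zero_or, Nat.zero_or]
    apply pv_and_orN_zero
    intro x hx
    obtain ⟨xl, hxl, hxe⟩ := List.mem_map.mp hx
    obtain ⟨g, hg, hge⟩ := hhigh_mem xl hxl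
    rw [Nat.land_comm]
    apply pv_and_orN_zero
    intro y hy
    obtain ⟨yl, hyl, hye⟩ := List.mem_map.mp hy
    obtain ⟨f, hf, hfe⟩ := hlow_mem yl hyl
    rw [← hxe, ← hye, hge, hfe]
    rw [Nat.land_comm]
    exact pv_boards_and_zero hnd hpre0 (by intro he; rw [he] at hf; exact hf hg)
  have hfinal : PySem.Int.bor (orF 0 lows) (orF 0 highs) = lows.sum + highs.sum := by
    have hl0 : 0 ≤ orF 0 lows := by
      rw [pv_orF_toNat _ 0 le_rfl hlows_nn]; exact Int.natCast_nonneg _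
    have hh0 : 0 ≤ orF 0 highs := by
      rw [pv_orF_toNat _ 0 le_rfl hhighs_nn]; exact Int.natCast_nonneg _
    rw [PySem.Int.bor_of_nonneg hl0 hh0, pv_or_eq_add _ _ hcross]
    push_cast
    rw [Int.toNat_of_nonneg hl0, Int.toNat_of_nonneg hh0, hlow_eq, hhigh_eq]
  -- now rewrite both sides
  rw [gen_pieces_bb, gen_pieces_bb_alt]
  simp only [hmain, hgrp]
  rw [pv_spL_split items 0 0]
  rw [show position.foldl (fun acc p => if acc.contains p.2 then acc else acc ++ [p.2])
        ([] : List String) = occ by rw [pv_order_eq]; simp [hocc]]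
  rw [hbbB]
  rw [← hlows, ← hhighs]
  simp only [PySem.List.pyGetD, PySem.List.pyGet?, PySem.List.pyIdx?]
  norm_num
  rw [hlow_eq, hhigh_eq]
  rw [hlow_eq, hhigh_eq] at hfinal
  exact ⟨⟨rfl, rfl⟩, hfinal⟩

-- ===== VERDICT (by name: the statement is the Claim_ definition above) =====
theorem gen_pieces_bb_spec : Claim_equal_gen_pieces_bb := by
  intro position _ hpre
  show gen_pieces_bb position = gen_pieces_bb_alt position
  exact gen_pieces_bb_eq position hpre.1 hpre.2
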